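-- pv_equiv track=rewrite | github.com/madara88645/Compiler | app/command_palette.py | compute_stale_favorites
-- ===== SOURCE A (Python) =====
-- from typing import Any, Iterable, List
--
-- def normalize_favorite_ids(values: Iterable[Any]) -> List[str]:
--     normalized: List[str] = []
--     for raw in values:
--         text = str(raw).strip()
--         if text:
--             normalized.append(text)
--     return normalized
--
-- def compute_stale_favorites(favorites: Iterable[Any], valid_ids: Iterable[str]) -> List[str]:
--     """Return ordered, deduped stale favorite ids (those not in valid_ids)."""
--
--     valid: set[str] = {str(v).strip() for v in valid_ids if str(v).strip()}
--     stale: List[str] = []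
--     seen: set[str] = set()
--     for fav in normalize_favorite_ids(favorites):
--         if fav in seen:
--             continue
--         seen.add(fav)
--         if fav not in valid:
--             stale.append(fav)
--     return stale
-- ===== SOURCE B (Python) =====
-- from typing import Any, Iterable, List
--
-- def normalize_favorite_ids(values: Iterable[Any]) -> List[str]:
--     normalized: List[str] = []
--     for raw in values:
--         text = str(raw).strip()
--         if text:
--             normalized.append(text)
--     return normalized
--
-- def compute_stale_favorites(favorites: Iterable[Any], valid_ids: Iterable[str]) -> List[str]:
--     """Return ordered, deduped stale favorite ids (those not in valid_ids)."""
--     valid = {str(v).strip() for v in valid_ids if str(v).strip()}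
--
--     # No 'seen' set: repeatedly take the first remaining favorite and delete all
--     # of its later duplicates from the remainder, yielding the first-occurrence
--     # order; then filter out the valid ids.
--     remaining = normalize_favorite_ids(favorites)
--     order: List[str] = []
--     while remaining:
--         head = remaining[0]
--         order.append(head)
--         remaining = [x for x in remaining[1:] if x != head]
--     return [h for h in order if h not in valid]
-- ===== Notes on version B (the rewrite author's own statement) =====
-- stated objective: alternative
-- what changed: Replaces A's single pass with a 'seen' set by a remainder-filtering loop: repeatedly take the first remaining favorite and delete its later duplicates from the remainder (no seen-set at all), then filter the resulting first-occurrence order against the valid ids.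
import Mathlib
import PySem

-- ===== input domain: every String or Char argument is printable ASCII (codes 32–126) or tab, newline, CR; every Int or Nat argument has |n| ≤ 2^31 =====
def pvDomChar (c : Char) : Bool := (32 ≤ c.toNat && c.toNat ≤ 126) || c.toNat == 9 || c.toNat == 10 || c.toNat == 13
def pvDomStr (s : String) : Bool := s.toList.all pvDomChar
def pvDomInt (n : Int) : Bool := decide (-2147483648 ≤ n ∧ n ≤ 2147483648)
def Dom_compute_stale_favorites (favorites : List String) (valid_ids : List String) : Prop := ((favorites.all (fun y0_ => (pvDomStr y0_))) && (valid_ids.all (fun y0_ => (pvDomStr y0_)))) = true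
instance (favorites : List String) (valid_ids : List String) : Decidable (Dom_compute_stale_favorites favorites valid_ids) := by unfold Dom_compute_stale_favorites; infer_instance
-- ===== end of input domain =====

-- B replaces A's seen-set single pass by structural recursion: keep the head, delete its later duplicates from the rest, recurse (alternative decomposition; return value only).


-- ===== PORT A =====
-- normalize_favorite_ids (shared helper of both Pythons)
def normalize_favorite_ids (values : List String) : List String :=
  values.foldl (fun normalized raw =>
    let text := PySem.Str.strip raw
    if text ≠ "" then normalized ++ [text] else normalized) []

def compute_stale_favorites (favorites : List String) (valid_ids : List String) : List String :=
  let valid : PySem.Set String :=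
    PySem.Set.ofList ((valid_ids.map PySem.Str.strip).filter (fun t => t ≠ ""))
  let res := (normalize_favorite_ids favorites).foldl
    (fun (st : List String × PySem.Set String) fav =>
      if PySem.Set.contains st.2 fav then st
      else
        let seen := PySem.Set.add st.2 fav
        if !PySem.Set.contains valid fav then (st.1 ++ [fav], seen) else (st.1, seen))
    ([], PySem.Set.empty)
  res.1

-- ===== PORT B =====
-- B's while loop: take the first remaining favorite, delete its later duplicates
-- from the remainder, repeat; yields the first-occurrence order
def uniqueOrder : List String → List String
  | [] => []
  | head :: remaining => head :: uniqueOrder (remaining.filter (fun x => x ≠ head))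
termination_by l => l.length
decreasing_by
  simp only [List.length_cons]
  exact Nat.lt_succ_of_le (by simpa using List.length_filter_le _ remaining.attach)

def compute_stale_favorites_alt (favorites : List String) (valid_ids : List String) : List String :=
  let valid : PySem.Set String :=
    PySem.Set.ofList ((valid_ids.map PySem.Str.strip).filter (fun t => t ≠ ""))
  let order := uniqueOrder (normalize_favorite_ids favorites)
  order.filter (fun h => !PySem.Set.contains valid h)

-- ===== PRECONDITION & SPEC =====
def Spec_compute_stale_favorites (favorites : List String) (valid_ids : List String) (out : List String) : Prop := out = compute_stale_favorites_alt favorites valid_ids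
instance (favorites : List String) (valid_ids : List String) (out : List String) : Decidable (Spec_compute_stale_favorites favorites valid_ids out) := by unfold Spec_compute_stale_favorites; infer_instance

-- ===== CLAIM =====
def Claim_equal_compute_stale_favorites : Prop := ∀ (favorites : List String) (valid_ids : List String), Dom_compute_stale_favorites favorites valid_ids → Spec_compute_stale_favorites favorites valid_ids (compute_stale_favorites favorites valid_ids)

-- ===== LEMMAS AND PROOFS =====

-- the 'seen' set grows by appending: the initial set is a prefix of the final one
lemma foldl_add_prefix (xs : List String) (s : PySem.Set String) :
    s <+: xs.foldl PySem.Set.add s := by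
  induction xs generalizing s with
  | nil => exact List.prefix_refl s
  | cons x xs ih =>
    refine List.IsPrefix.trans ?_ (ih (PySem.Set.add s x))
    simp only [PySem.Set.add]
    split
    · exact List.prefix_refl s
    · exact List.prefix_append s [x]

-- A's loop, started at (stale, seen), returns stale ++ (the not-yet-seen uniques of xs that are not valid)
lemma loop_eq (valid : PySem.Set String) (xs : List String)
    (stale : List String) (seen : PySem.Set String) :
    (xs.foldl
      (fun (st : List String × PySem.Set String) fav =>
        if PySem.Set.contains st.2 fav then st
        else
          let sn := PySem.Set.add st.2 fav
          if !PySem.Set.contains valid fav then (st.1 ++ [fav], sn) else (st.1, sn))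
      (stale, seen)).1
    = stale ++ ((xs.foldl PySem.Set.add seen).drop seen.length).filter
        (fun f => !PySem.Set.contains valid f) := by
  induction xs generalizing stale seen with
  | nil => simp
  | cons x xs ih =>
    by_cases hx : x ∈ seen
    · have hadd : PySem.Set.add seen x = seen := by simp [PySem.Set.add, hx]
      simpa [PySem.Set.contains, hx, hadd] using ih stale seen
    · have hadd : PySem.Set.add seen x = seen ++ [x] := by simp [PySem.Set.add, hx]
      have hxd : PySem.Set.contains seen x = false := by simp [PySem.Set.contains, hx]
      obtain ⟨t, ht⟩ := foldl_add_prefix xs (seen ++ [x])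
      have hdrop1 : (xs.foldl PySem.Set.add (seen ++ [x])).drop seen.length = x :: t := by
        rw [← ht, List.append_assoc, List.drop_left]
        simp
      have hdrop2 : (xs.foldl PySem.Set.add (seen ++ [x])).drop (seen ++ [x]).length = t := by
        rw [← ht, List.drop_left]
      simp only [List.foldl_cons, hxd, Bool.false_eq_true, not_false_iff, if_neg, hadd]
      by_cases hv : x ∈ valid
      · have hvd : PySem.Set.contains valid x = true := by simp [PySem.Set.contains, hv]
        simp only [hvd, Bool.not_true, Bool.false_eq_true, not_false_iff, if_neg]
        rw [ih stale (seen ++ [x]), hdrop2, hdrop1]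
        simp [List.filter_cons, hv]
      · have hvd : PySem.Set.contains valid x = false := by simp [PySem.Set.contains, hv]
        simp only [hvd, Bool.not_false, if_pos]
        rw [ih (stale ++ [x]) (seen ++ [x]), hdrop2, hdrop1]
        simp [List.filter_cons, hv]

-- the foldl-of-Set.add dedup equals uniqueOrder (generalized over the start set)
lemma foldl_add_eq_uniqueOrder :
    ∀ (xs : List String) (s : PySem.Set String),
      xs.foldl PySem.Set.add s = s ++ uniqueOrder (xs.filter (fun y => !s.contains y)) := by
  intro xs
  induction xs with
  | nil => intro s; simp; rw [uniqueOrder]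
  | cons x xs ih =>
    intro s
    by_cases hx : x ∈ s
    · have hadd : PySem.Set.add s x = s := by simp [PySem.Set.add, hx]
      simp only [List.foldl_cons, hadd, List.filter_cons]
      simp [hx, ih s]
    · have hadd : PySem.Set.add s x = s ++ [x] := by simp [PySem.Set.add, hx]
      simp only [List.foldl_cons, hadd, List.filter_cons]
      rw [ih (s ++ [x])]
      have hf : xs.filter (fun y => !(s ++ [x]).contains y)
          = (xs.filter (fun y => !s.contains y)).filter (fun y => y ≠ x) := by
        rw [List.filter_filter]
        apply List.filter_congr
        intro y _
        by_cases hyx : y = x <;> by_cases hys : y ∈ s <;> simp [hyx, hys, hx]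
      rw [hf]
      have hpx : (!s.contains x) = true := by simp [hx]
      simp only [hpx, if_true]
      conv_rhs => rw [uniqueOrder]
      simp

-- ===== VERDICT =====
theorem compute_stale_favorites_spec : Claim_equal_compute_stale_favorites := by
  intro favorites valid_ids _
  show _ = _
  unfold compute_stale_favorites compute_stale_favorites_alt
  rw [loop_eq]
  rw [PySem.Set.ofList_eq_foldl] at *
  simp [PySem.Set.empty, foldl_add_eq_uniqueOrder]
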